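-- pv_equiv track=rewrite | github.com/dakoner/dnahash | genome_to_2bit.py | convert_to_2bit
-- ===== SOURCE A (Python) =====
-- from collections import Counter
--
-- TABLE = {
--     'A': 0,
--     'C': 1,
--     'G': 2,
--     'T': 3
--     }
--
-- def convert_kmer_to_2bit(kmer):
--     n = 0
--     for c in kmer:
--         v = TABLE.get(c, None)
--         if v is None:
--             raise RuntimeError
--         n <<= 2
--         n += v
--     return n
--
-- def convert_to_2bit(s):
--     c = Counter()
--     for i in range(0, len(s), 8):
--         kmer = s[i:i+8]
--         try:
--             n = convert_kmer_to_2bit(kmer)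
--         except RuntimeError:
--             pass
--         else:
--             c[n] += 1
--     return c
-- ===== SOURCE B (Python) =====
-- from collections import Counter
--
-- _TR = str.maketrans('ACGT', '0123')
--
-- def convert_to_2bit(s):
--     c = Counter()
--     for i in range(0, len(s), 8):
--         kmer = s[i:i+8]
--         if all(ch in 'ACGT' for ch in kmer):
--             c[int(kmer.translate(_TR), 4)] += 1
--     return c
-- ===== Notes on version B (the rewrite author's own statement) =====
-- stated objective: idiomatic
-- what changed: The shift-and-accumulate helper with exception control flow is replaced by an explicit ACGT validity guard plus a base-4 string parse (str.translate + int(_,4)) per 8-char chunk.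
import Mathlib
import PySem

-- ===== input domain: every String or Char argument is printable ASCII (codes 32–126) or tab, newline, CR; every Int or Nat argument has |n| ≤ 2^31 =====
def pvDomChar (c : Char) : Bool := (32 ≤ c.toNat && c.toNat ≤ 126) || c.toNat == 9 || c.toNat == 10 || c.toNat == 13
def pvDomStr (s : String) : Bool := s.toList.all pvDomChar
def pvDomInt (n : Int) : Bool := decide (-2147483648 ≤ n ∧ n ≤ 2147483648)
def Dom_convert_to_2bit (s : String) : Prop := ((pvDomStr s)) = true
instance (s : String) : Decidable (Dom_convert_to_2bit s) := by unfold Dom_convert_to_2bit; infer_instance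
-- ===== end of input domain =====

-- B replaces A's shift-accumulate helper (with exception control flow) by an explicit
-- ACGT validity guard followed by a base-4 string parse of the translated chunk (idiomatic).

-- ===== PORT A =====
def pvTABLE : PySem.Dict Char Int :=
  PySem.Dict.ofList [('A', 0), ('C', 1), ('G', 2), ('T', 3)]

-- none models the RuntimeError raised on a non-ACGT character
def convert_kmer_to_2bit (kmer : List Char) : Option Int :=
  kmer.foldl (fun acc c =>
    match acc with
    | none => none
    | some n =>
      match pvTABLE.get? c with
      | none => none
      | some v => some (n * 4 + v)) (some 0)

def convert_to_2bit (s : String) : List (Int × Int) :=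
  ((PySem.List.pyRange 0 (s.toList.length : Int) 8).foldl
    (fun c i =>
      let kmer := PySem.List.slice s.toList (some i) (some (i + 8))
      match convert_kmer_to_2bit kmer with
      | none => c
      | some n => c.modify n 0 (· + 1)) PySem.Dict.empty).items

-- ===== PORT B =====
-- str.translate over 'ACGT'→'0123' (identity elsewhere); exact for the single chars used here
def pvTr (c : Char) : Char :=
  if c = 'A' then '0' else if c = 'C' then '1' else if c = 'G' then '2'
  else if c = 'T' then '3' else c

-- int(x, 4) on a string of base-4 digit characters (the guard ensures only '0'..'3' occur)
def pvParse4 (cs : List Char) : Int :=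
  cs.foldl (fun a c => a * 4 + ((c.toNat : Int) - 48)) 0

def convert_to_2bit_alt (s : String) : List (Int × Int) :=
  ((PySem.List.pyRange 0 (s.toList.length : Int) 8).foldl
    (fun c i =>
      let kmer := PySem.List.slice s.toList (some i) (some (i + 8))
      if kmer.all (fun ch => "ACGT".toList.contains ch) then
        c.modify (pvParse4 (kmer.map pvTr)) 0 (· + 1)
      else c) PySem.Dict.empty).items

-- ===== PRECONDITION & SPEC =====
def Spec_convert_to_2bit (s : String) (out : List (Int × Int)) : Prop := out = convert_to_2bit_alt s
instance (s : String) (out : List (Int × Int)) : Decidable (Spec_convert_to_2bit s out) := by unfold Spec_convert_to_2bit; infer_instance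

-- ===== CLAIM (what is proved, stated in full; the proofs are below) =====
def Claim_equal_convert_to_2bit : Prop := ∀ (s : String), Dom_convert_to_2bit s → Spec_convert_to_2bit s (convert_to_2bit s)

-- ===== LEMMAS AND PROOFS =====

theorem foldA_none (cs : List Char) :
    cs.foldl (fun acc c =>
      match acc with
      | none => none
      | some n =>
        match pvTABLE.get? c with
        | none => none
        | some v => some (n * 4 + v)) (none : Option Int) = none := by
  induction cs with
  | nil => rfl
  | cons c cs ih => simpa using ih

theorem char_valid (c : Char) (h : "ACGT".toList.contains c = true) :
    pvTABLE.get? c = some (((pvTr c).toNat : Int) - 48) := by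
  have e : "ACGT".toList = ['A', 'C', 'G', 'T'] := rfl
  rw [e] at h
  have h' : c = 'A' ∨ c = 'C' ∨ c = 'G' ∨ c = 'T' := by
    simpa using h
  rcases h' with h | h | h | h <;> subst h <;> decide

theorem char_invalid (c : Char) (h : ¬ "ACGT".toList.contains c = true) :
    pvTABLE.get? c = none := by
  have e : "ACGT".toList = ['A', 'C', 'G', 'T'] := rfl
  rw [e] at h
  have h' : c ≠ 'A' ∧ c ≠ 'C' ∧ c ≠ 'G' ∧ c ≠ 'T' := by
    simp only [List.contains_eq_mem, decide_eq_true_eq, List.mem_cons, List.not_mem_nil,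
      or_false, not_or] at h
    exact ⟨h.1, h.2.1, h.2.2.1, h.2.2.2⟩
  obtain ⟨h1, h2, h3, h4⟩ := h'
  have em : pvTABLE = PySem.Dict.mk [('A', 0), ('C', 1), ('G', 2), ('T', 3)] := by decide
  rw [em]
  simp [PySem.Dict.get?, Ne.symm h1, Ne.symm h2, Ne.symm h3, Ne.symm h4]

theorem kmer_fold_eq (cs : List Char) : ∀ n : Int,
    cs.foldl (fun acc c =>
      match acc with
      | none => none
      | some m =>
        match pvTABLE.get? c with
        | none => none
        | some v => some (m * 4 + v)) (some n)
    = if cs.all (fun ch => "ACGT".toList.contains ch) then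
        some (cs.foldl (fun a c => a * 4 + (((pvTr c).toNat : Int) - 48)) n)
      else none := by
  induction cs with
  | nil => intro n; rfl
  | cons c cs ih =>
    intro n
    by_cases hc : "ACGT".toList.contains c = true
    · rw [show (c :: cs).foldl (fun acc c =>
        match acc with
        | none => none
        | some m =>
          match pvTABLE.get? c with
          | none => none
          | some v => some (m * 4 + v)) (some n)
        = cs.foldl _ (match pvTABLE.get? c with
            | none => none
            | some v => some (n * 4 + v)) from rfl]
      rw [char_valid c hc]
      rw [ih]
      simp only [List.all_cons, List.foldl_cons, hc, Bool.true_and]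
    · rw [show (c :: cs).foldl (fun acc c =>
        match acc with
        | none => none
        | some m =>
          match pvTABLE.get? c with
          | none => none
          | some v => some (m * 4 + v)) (some n)
        = cs.foldl _ (match pvTABLE.get? c with
            | none => none
            | some v => some (n * 4 + v)) from rfl]
      rw [char_invalid c hc]
      simp only [List.all_cons, hc, Bool.false_and, if_neg Bool.false_ne_true]
      exact foldA_none cs

theorem kmer_eq (cs : List Char) :
    convert_kmer_to_2bit cs
    = if cs.all (fun ch => "ACGT".toList.contains ch) then some (pvParse4 (cs.map pvTr))
      else none := by
  unfold convert_kmer_to_2bit pvParse4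
  rw [kmer_fold_eq cs 0]
  congr 1
  rw [List.foldl_map]

-- ===== VERDICT (by name: the statement is the Claim_ definition above) =====
theorem convert_to_2bit_spec : Claim_equal_convert_to_2bit := by
  intro s _
  unfold Spec_convert_to_2bit convert_to_2bit convert_to_2bit_alt
  congr 1
  apply PySem.List.foldl_congr_mem
  intro acc i _
  simp only []
  rw [kmer_eq]
  split_ifs with h <;> rfl
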